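-- pv_equiv track=rewrite | github.com/jorgemauricio/becarios | ejercicios/09_examen.py | ordenar_letras
-- ===== SOURCE A (Python) =====
-- def ordenar_letras(palabra, alfabeto):
--     """
--     Función que ordena las letras de una palabra
--     param: word: palabra a la cual se le van a ordenar sus letras
--     """
--     lista = ''
--     for i in alfabeto:
--     	for j in palabra:
--     		if j == i:
--     			lista = lista + j
--     return lista
--     print (lista)
-- ===== SOURCE B (Python) =====
-- def ordenar_letras(palabra, alfabeto):
--     """
--     Funcion que ordena las letras de una palabra
--     param: word: palabra a la cual se le van a ordenar sus letras
--     """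
--     counts = {}
--     for c in palabra:
--         counts[c] = counts.get(c, 0) + 1
--     return ''.join(c * counts.get(c, 0) for c in alfabeto)
-- ===== Notes on version B (the rewrite author's own statement) =====
-- stated objective: faster
-- what changed: Replaces A's nested rescans of the word (one full pass over palabra per alphabet symbol) with a single counting pass over palabra into a dict, then emits each alphabet symbol repeated by its count.
import Mathlib
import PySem

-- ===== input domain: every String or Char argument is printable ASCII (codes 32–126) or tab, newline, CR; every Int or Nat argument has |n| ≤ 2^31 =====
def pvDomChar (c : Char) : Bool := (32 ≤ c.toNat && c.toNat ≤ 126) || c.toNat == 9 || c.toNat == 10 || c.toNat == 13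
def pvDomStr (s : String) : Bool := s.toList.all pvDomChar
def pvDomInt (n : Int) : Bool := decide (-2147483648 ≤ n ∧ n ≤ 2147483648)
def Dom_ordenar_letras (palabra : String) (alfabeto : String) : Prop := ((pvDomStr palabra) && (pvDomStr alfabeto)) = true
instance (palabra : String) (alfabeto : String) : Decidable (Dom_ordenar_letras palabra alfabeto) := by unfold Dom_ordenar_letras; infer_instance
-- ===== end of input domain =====

-- B replaces A's per-alphabet-symbol rescans of the word with one counting pass into a dict (faster).


-- ===== PORT A =====
-- lista = ''; for i in alfabeto: for j in palabra: if j == i: lista = lista + j; return lista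
-- (string concatenation ported as a List Char accumulator, packed with String.mk at the end)
def ordenar_letras (palabra : String) (alfabeto : String) : String :=
  String.mk
    (alfabeto.toList.foldl
      (fun lista i =>
        palabra.toList.foldl
          (fun lista j => if j == i then lista ++ [j] else lista) lista)
      [])

-- ===== PORT B =====
-- counts = {}; for c in palabra: counts[c] = counts.get(c, 0) + 1
-- return ''.join(c * counts.get(c, 0) for c in alfabeto)
def ordenar_letras_alt (palabra : String) (alfabeto : String) : String :=
  let counts : PySem.Dict Char Int :=
    palabra.toList.foldl (fun d c => d.insert c (d.getD c 0 + 1)) PySem.Dict.empty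
  String.mk (alfabeto.toList.flatMap (fun c => List.replicate (counts.getD c 0).toNat c))

-- ===== PRECONDITION & SPEC =====
def Spec_ordenar_letras (palabra : String) (alfabeto : String) (out : String) : Prop := out = ordenar_letras_alt palabra alfabeto
instance (palabra : String) (alfabeto : String) (out : String) : Decidable (Spec_ordenar_letras palabra alfabeto out) := by unfold Spec_ordenar_letras; infer_instance

-- ===== CLAIM (what is proved, stated in full; the proofs are below) =====
def Claim_equal_ordenar_letras : Prop := ∀ (palabra : String) (alfabeto : String), Dom_ordenar_letras palabra alfabeto → Spec_ordenar_letras palabra alfabeto (ordenar_letras palabra alfabeto)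

-- ===== LEMMAS AND PROOFS =====

-- One alphabet symbol's contribution: the chars of ws equal to i are i repeated (ws.count i) times.
theorem pv_block_eq (ws : List Char) (i : Char) :
    ws.filter (fun j => j == i) = List.replicate (ws.count i) i := by
  simpa using List.filter_beq (l := ws) (a := i)

-- ===== VERDICT (by name: the statement is the Claim_ definition above) =====
theorem ordenar_letras_spec : Claim_equal_ordenar_letras := by
  intro palabra alfabeto _
  unfold Spec_ordenar_letras ordenar_letras ordenar_letras_alt
  simp only [PySem.List.foldl_append_if_eq_filter,    PySem.List.foldl_append_eq_flatMap, PySem.Dict.getD_foldl_insert_add_one, List.nil_append]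
  congr 1
  congr 1
  funext i
  rw [pv_block_eq]
  simp
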